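-- pv_equiv track=rewrite | github.com/Wpawlina/AGH-ITCS-Course | cwiczenia/tablice dwuwymiarowe 4/singletony6.py | isSingleton
-- ===== SOURCE A (Python) =====
-- def isSingleton(t,num):
--     n=len(t)
--     flag=False
--     for i in range(n):
--         for j in range(n):
--             if t[i][j]==num and not flag:
--                 flag=True
--             elif t[i][j]==num and flag:
--                 return False
--     return True
-- ===== SOURCE B (Python) =====
-- def isSingleton(t, num):
--     n = len(t)
--     cells = [x for row in t for x in row[:n]]
--     return cells.count(num) <= 1
-- ===== Notes on version B (the rewrite author's own statement) =====
-- stated objective: simpler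
-- what changed: Replaces A's index-based flag/early-exit double loop with a flatten of the first n columns of each row via slicing followed by a single list.count compared against 1.
import Mathlib
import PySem

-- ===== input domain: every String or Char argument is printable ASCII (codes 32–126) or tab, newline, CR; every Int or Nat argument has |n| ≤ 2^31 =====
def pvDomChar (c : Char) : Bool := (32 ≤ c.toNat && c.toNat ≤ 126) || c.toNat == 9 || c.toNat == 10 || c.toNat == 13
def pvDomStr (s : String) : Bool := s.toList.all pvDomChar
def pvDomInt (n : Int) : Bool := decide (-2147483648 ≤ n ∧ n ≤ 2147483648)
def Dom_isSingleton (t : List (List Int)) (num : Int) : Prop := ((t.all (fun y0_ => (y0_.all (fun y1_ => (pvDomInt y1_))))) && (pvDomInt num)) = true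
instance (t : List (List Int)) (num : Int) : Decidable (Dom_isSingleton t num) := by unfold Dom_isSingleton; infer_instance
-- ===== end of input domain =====

-- B replaces A's flag-based early-exit index scan by flattening the first n columns of
-- each row (slices) and comparing a single occurrence count against 1 (objective: simpler).


-- ===== PORT A =====
-- t[i][j] on in-range nonnegative indices (guaranteed where A reads them); exact there.
def cellAt (t : List (List Int)) (i j : Int) : Int := (t.getD i.toNat []).getD j.toNat 0

-- inner-loop body: state (done, flag), done = 'return False' already executed
def stepA (t : List (List Int)) (num i : Int) (s : Bool × Bool) (j : Int) : Bool × Bool :=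
  if s.1 then s
  else if cellAt t i j == num && !s.2 then (s.1, true)
  else if cellAt t i j == num && s.2 then (true, s.2)
  else s

def rowA (t : List (List Int)) (num n : Int) (s : Bool × Bool) (i : Int) : Bool × Bool :=
  (PySem.List.pyRange 0 n 1).foldl (stepA t num i) s

def isSingleton (t : List (List Int)) (num : Int) : Bool :=
  let n : Int := t.length
  !((PySem.List.pyRange 0 n 1).foldl (rowA t num n) (false, false)).1

-- ===== PORT B =====
def isSingleton_alt (t : List (List Int)) (num : Int) : Bool :=
  let n : Int := t.length
  let cells : List Int := t.flatMap (fun row => PySem.List.slice row none (some n))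
  decide (cells.count num ≤ 1)

-- ===== PRECONDITION & SPEC =====
-- Pre_ is A's exact domain: either every row has at least len(t) entries (no IndexError),
-- or the first too-short row comes after ≥ 2 occurrences of num among the cells A scans
-- (so A returns False before reaching the out-of-range index); otherwise A raises IndexError.
def Pre_isSingleton (t : List (List Int)) (num : Int) : Prop :=
  (∀ row ∈ t, t.length ≤ row.length) ∨
  (∃ i0, i0 < t.length ∧ (t.getD i0 []).length < t.length ∧
    (∀ i, i < i0 → t.length ≤ (t.getD i []).length) ∧
    2 ≤ (((t.take i0).flatMap (fun row => row.take t.length)) ++ t.getD i0 []).count num)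
instance (t : List (List Int)) (num : Int) : Decidable (Pre_isSingleton t num) := by
  unfold Pre_isSingleton; infer_instance
def pvWitness_isSingleton : List (List Int) × Int := ([[1, 2], [3, 4]], 1)

def Spec_isSingleton (t : List (List Int)) (num : Int) (out : Bool) : Prop := out = isSingleton_alt t num
instance (t : List (List Int)) (num : Int) (out : Bool) : Decidable (Spec_isSingleton t num out) := by unfold Spec_isSingleton; infer_instance

-- ===== CLAIM (what is proved, stated in full; the proofs are below) =====
def Claim_equal_isSingleton : Prop := ∀ (t : List (List Int)) (num : Int), Dom_isSingleton t num → Pre_isSingleton t num → Spec_isSingleton t num (isSingleton t num)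

-- ===== LEMMAS AND PROOFS =====

-- A's loop state as a function of the number c of occurrences seen so far
def stA (c : Nat) : Bool × Bool := (decide (2 ≤ c), decide (1 ≤ c))

-- the cells A's port scans / the cells B's port counts, as flat lists
def cellsA (t : List (List Int)) (num : Int) : List Int :=
  ((List.range t.length).map
    (fun (i : Nat) => (List.range t.length).map (fun (j : Nat) => cellAt t (i : Int) (j : Int)))).flatten

def cellsB (t : List (List Int)) : List Int := t.flatMap (fun row => row.take t.length)

theorem stepA_stA (t : List (List Int)) (num i j : Int) (c : Nat) :
    stepA t num i (stA c) j = stA (c + if cellAt t i j == num then 1 else 0) := by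
  unfold stepA stA
  by_cases h : cellAt t i j == num <;> simp [h] <;> split_ifs <;> simp_all <;> omega

theorem inner_gen (t : List (List Int)) (num i : Int) (k : Nat) (c : Nat) :
    (PySem.List.pyRange 0 (k : Int) 1).foldl (stepA t num i) (stA c)
      = stA (c + ((List.range k).map (fun (j : Nat) => cellAt t i (j : Int))).count num) := by
  induction k generalizing c with
  | zero => simp [PySem.List.pyRange_one_eq_nil]
  | succ k ih =>
      have hcast : ((k + 1 : Nat) : Int) = (k : Int) + 1 := by push_cast; ring
      rw [hcast, PySem.List.pyRange_one_succ_right (by positivity), List.foldl_append,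
        ih, List.foldl_cons, List.foldl_nil, stepA_stA, List.range_succ, List.map_append,
        List.count_append]
      simp [List.count_singleton, Nat.add_assoc]

theorem outer_gen (t : List (List Int)) (num : Int) (m : Nat) (c : Nat) :
    (PySem.List.pyRange 0 (m : Int) 1).foldl (rowA t num (t.length : Int)) (stA c)
      = stA (c + (((List.range m).map
          (fun (i : Nat) => (List.range t.length).map (fun (j : Nat) => cellAt t (i : Int) (j : Int)))).flatten).count num) := by
  induction m generalizing c with
  | zero => simp [PySem.List.pyRange_one_eq_nil]
  | succ m ih =>
      have hcast : ((m + 1 : Nat) : Int) = (m : Int) + 1 := by push_cast; ring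
      rw [hcast, PySem.List.pyRange_one_succ_right (by positivity), List.foldl_append,
        ih, List.foldl_cons, List.foldl_nil]
      unfold rowA
      rw [inner_gen t num (m : Int) t.length]
      rw [List.range_succ, List.map_append, List.flatten_append, List.count_append]
      simp [Nat.add_assoc]

theorem portA_count (t : List (List Int)) (num : Int) :
    isSingleton t num = decide ((cellsA t num).count num ≤ 1) := by
  simp only [isSingleton, cellsA]
  have h0 : ((false, false) : Bool × Bool) = stA 0 := by simp [stA]
  rw [h0, outer_gen t num t.length 0]
  unfold stA
  by_cases h : 2 ≤ (((List.range t.length).map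
      (fun (i : Nat) => (List.range t.length).map (fun (j : Nat) => cellAt t (i : Int) (j : Int)))).flatten).count num <;>
    simp [h] <;> omega

theorem portB_count (t : List (List Int)) (num : Int) :
    isSingleton_alt t num = decide ((cellsB t).count num ≤ 1) := by
  simp only [isSingleton_alt, cellsB]
  have hslice : ∀ row : List Int,
      PySem.List.slice row none (some (t.length : Int)) = row.take t.length := by
    intro row
    rw [PySem.List.slice_to _ (by positivity)]
    simp
  simp only [hslice]
  rfl

-- the row of cells A's port reads at index i equals row.take n when the row is long enough
theorem rowcells_eq (t : List (List Int)) (i : Nat)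
    (hlen : t.length ≤ (t.getD i []).length) :
    (List.range t.length).map (fun (j : Nat) => cellAt t (i : Int) (j : Int))
      = (t.getD i []).take t.length := by
  apply List.ext_getElem
  · simp [List.getD] at hlen ⊢
    omega
  · intro j hj1 hj2
    have hjn : j < t.length := by simpa using hj1
    have hjlen : j < (t.getD i []).length := lt_of_lt_of_le hjn hlen
    simp only [List.getElem_map, List.getElem_range, List.getElem_take]
    unfold cellAt
    simp only [Int.toNat_natCast]
    exact List.getD_eq_getElem _ 0 hjlen

-- indexing a list by range of its length is mapping over the list
theorem range_getD_map {α β : Type} [Inhabited α] (l : List α) (g : α → β) :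
    (List.range l.length).map (fun i => g (l.getD i default)) = l.map g := by
  induction l with
  | nil => simp
  | cons a l ih =>
      rw [List.length_cons, List.range_succ_eq_map, List.map_cons, List.map_map]
      have h2 : ((fun i => g ((a :: l).getD i default)) ∘ (fun i => i + 1))
          = (fun i => g (l.getD i default)) := by
        funext i
        simp [Function.comp, List.getD_cons_succ]
      rw [h2, ih, List.map_cons, List.getD_cons_zero]

theorem cellsA_rect (t : List (List Int)) (num : Int)
    (hpre : ∀ row ∈ t, t.length ≤ row.length) : cellsA t num = cellsB t := by
  unfold cellsA cellsB
  have h1 : (List.range t.length).map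
      (fun (i : Nat) => (List.range t.length).map (fun (j : Nat) => cellAt t (i : Int) (j : Int)))
      = (List.range t.length).map (fun i => (t.getD i []).take t.length) := by
    apply List.map_congr_left
    intro i hi
    apply rowcells_eq
    apply hpre
    have hlt : i < t.length := by simpa using hi
    rw [List.getD_eq_getElem _ [] hlt]
    exact List.getElem_mem hlt
  rw [h1]
  have h2 : (List.range t.length).map (fun i => (t.getD i []).take t.length)
      = t.map (fun row => row.take t.length) := range_getD_map t _
  rw [h2, List.flatMap_def]

-- in the crash-avoided case both cell lists contain the ≥2-occurrence prefix
theorem count_cellsB_ge (t : List (List Int)) (num : Int) (i0 : Nat) (hi0 : i0 < t.length)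
    (hshort : (t.getD i0 []).length < t.length)
    (hc : 2 ≤ (((t.take i0).flatMap (fun row => row.take t.length)) ++ t.getD i0 []).count num) :
    2 ≤ (cellsB t).count num := by
  unfold cellsB
  set n := t.length with hn
  have hrow : t.getD i0 [] = t[i0] := List.getD_eq_getElem _ [] hi0
  have hsplit : t = t.take i0 ++ t[i0] :: t.drop (i0 + 1) := by
    rw [← List.drop_eq_getElem_cons hi0, List.take_append_drop]
  rw [List.count_append] at hc
  conv_rhs => rw [hsplit]
  rw [List.flatMap_append, List.flatMap_cons, List.count_append, List.count_append]
  have htake : t[i0].take n = t[i0] := List.take_of_length_le (by rw [← hrow]; omega)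
  rw [htake, ← hrow]
  omega

theorem count_cellsA_ge (t : List (List Int)) (num : Int) (i0 : Nat) (hi0 : i0 < t.length)
    (hshort : (t.getD i0 []).length < t.length)
    (hfirst : ∀ i, i < i0 → t.length ≤ (t.getD i []).length)
    (hc : 2 ≤ (((t.take i0).flatMap (fun row => row.take t.length)) ++ t.getD i0 []).count num) :
    2 ≤ (cellsA t num).count num := by
  unfold cellsA
  set F : Nat → List Int :=
    fun (i : Nat) => (List.range t.length).map (fun (j : Nat) => cellAt t (i : Int) (j : Int)) with hF
  rw [List.count_append] at hc
  have hsplit : List.range t.length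
      = List.range i0 ++ [i0] ++ (List.range (t.length - (i0 + 1))).map (fun k => (i0 + 1) + k) := by
    conv_lhs => rw [show t.length = (i0 + 1) + (t.length - (i0 + 1)) by omega]
    rw [List.range_add, List.range_succ]
  rw [hsplit, List.map_append, List.map_append, List.flatten_append, List.flatten_append,
    List.count_append, List.count_append]
  -- first block: the full prefix rows
  have hpref : ((List.range i0).map F).flatten
      = (t.take i0).flatMap (fun row => row.take t.length) := by
    have h1 : (List.range i0).map F
        = (List.range i0).map (fun i => (t.getD i []).take t.length) := by
      apply List.map_congr_left
      intro i hi
      rw [hF]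
      exact rowcells_eq t i (hfirst i (by simpa using hi))
    have hlen0 : (t.take i0).length = i0 := by simp; omega
    have h2 : (List.range i0).map (fun i => (t.getD i []).take t.length)
        = (t.take i0).map (fun row => row.take t.length) := by
      have h3 := range_getD_map (t.take i0) (fun row => row.take t.length)
      rw [hlen0] at h3
      rw [← h3]
      apply List.map_congr_left
      intro i hi
      have hii : i < i0 := by simpa using hi
      have h4 : (t.take i0).getD i default = t.getD i [] := by
        have h5 : (t.take i0)[i]? = t[i]? := List.getElem?_take_of_lt hii
        simp [List.getD, h5]
        rfl
      rw [h4]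
    rw [h1, h2, List.flatMap_def]
  -- middle block: the cells of the short row are among the cells read at row i0
  have hmid : (t.getD i0 []).count num ≤ (F i0).count num := by
    simp only [hF]
    set r := t.getD i0 [] with hr
    have hsplit2 : List.range t.length
        = List.range r.length ++ (List.range (t.length - r.length)).map (fun k => r.length + k) := by
      conv_lhs => rw [show t.length = r.length + (t.length - r.length) by omega]
      rw [List.range_add]
    have hfirstpart : (List.range r.length).map (fun (j : Nat) => cellAt t (i0 : Int) (j : Int)) = r := by
      apply List.ext_getElem
      · simp
      · intro j hj1 hj2
        simp only [List.getElem_map, List.getElem_range]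
        unfold cellAt
        simp only [Int.toNat_natCast, ← hr]
        exact List.getD_eq_getElem _ 0 (by simpa using hj1)
    rw [hsplit2, List.map_append, List.count_append, hfirstpart]
    omega
  simp only [List.map_cons, List.map_nil, List.flatten_cons, List.flatten_nil, List.append_nil]
  rw [hpref]
  omega

-- ===== VERDICT (by name: the statement is the Claim_ definition above) =====
theorem isSingleton_spec : Claim_equal_isSingleton := by
  intro t num _ hpre
  unfold Spec_isSingleton
  rw [portA_count, portB_count]
  rcases hpre with hrect | ⟨i0, hi0, hshort, hfirst, hc⟩
  · rw [cellsA_rect t num hrect]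
  · have hA := count_cellsA_ge t num i0 hi0 hshort hfirst hc
    have hB := count_cellsB_ge t num i0 hi0 hshort hc
    have h1 : ¬ (cellsA t num).count num ≤ 1 := by omega
    have h2 : ¬ (cellsB t).count num ≤ 1 := by omega
    simp [h1, h2]
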